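-- pv_equiv track=rewrite | github.com/SleepyJimmy/Tetris-RL-Optimisation | algorithms/ppo/features.py | get_wells
-- ===== SOURCE A (Python) =====
-- def get_wells(peaks):
--     wells = []
--     sum = 0
--     for i in range(len(peaks)):
--         if i == 0:
--             w = peaks[1] - peaks[0]
--             w = w if w > 0 else 0
--             wells.append(w)
--         elif i == len(peaks) - 1:
--             w = peaks[-2] - peaks[-1]
--             w = w if w > 0 else 0
--             wells.append(w)
--         else:
--             w1 = peaks[i - 1] - peaks[i]
--             w2 = peaks[i + 1] - peaks[i]
--             w1 = w1 if w1 > 0 else 0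
--             w2 = w2 if w2 > 0 else 0
--             w = w1 if w1 >= w2 else w2
--             wells.append(w)
--
--     wells = [int(number) for number in wells]
--
--     for number in wells:
--         count = 0
--         for i in range(number + 1):
--             count += i
--             sum += count
--
--     return sum
-- ===== SOURCE B (Python) =====
-- def get_wells(peaks):
--     n = len(peaks)
--     total = 0
--     for i in range(n):
--         l = peaks[i - 1] - peaks[i] if i > 0 else 0
--         r = peaks[i + 1] - peaks[i] if i < n - 1 else 0
--         w = max(l, r, 0)
--         total += w * (w + 1) * (w + 2) // 6
--     return total
-- ===== Notes on version B (the rewrite author's own statement) =====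
-- stated objective: faster
-- what changed: B replaces the intermediate wells list and the nested count/sum accumulation loops with a single pass that adds the closed-form tetrahedral number w*(w+1)*(w+2)//6 for each well depth.
import Mathlib
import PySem

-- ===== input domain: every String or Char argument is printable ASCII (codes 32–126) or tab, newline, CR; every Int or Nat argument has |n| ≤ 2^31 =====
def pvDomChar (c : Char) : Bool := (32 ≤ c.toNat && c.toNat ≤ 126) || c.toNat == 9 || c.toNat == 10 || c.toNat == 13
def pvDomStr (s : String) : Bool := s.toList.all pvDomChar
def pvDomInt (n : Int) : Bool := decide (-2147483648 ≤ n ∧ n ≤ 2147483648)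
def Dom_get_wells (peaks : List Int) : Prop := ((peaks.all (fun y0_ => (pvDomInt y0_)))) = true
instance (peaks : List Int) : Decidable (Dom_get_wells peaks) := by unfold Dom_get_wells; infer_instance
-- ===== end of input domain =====

-- B replaces A's intermediate wells list and nested count/sum loops by a single pass
-- adding the closed-form tetrahedral number w*(w+1)*(w+2)//6 per well depth.

-- ===== PORT A =====
def get_wells (peaks : List Int) : Int :=
  let n : Int := peaks.length
  let wells : List Int := (PySem.List.pyRange 0 n 1).map (fun i =>
    if i = 0 then
      let w := PySem.List.pyGetD peaks 1 0 - PySem.List.pyGetD peaks 0 0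
      if w > 0 then w else 0
    else if i = n - 1 then
      let w := PySem.List.pyGetD peaks (-2) 0 - PySem.List.pyGetD peaks (-1) 0
      if w > 0 then w else 0
    else
      let w1 := PySem.List.pyGetD peaks (i - 1) 0 - PySem.List.pyGetD peaks i 0
      let w2 := PySem.List.pyGetD peaks (i + 1) 0 - PySem.List.pyGetD peaks i 0
      let w1' := if w1 > 0 then w1 else 0
      let w2' := if w2 > 0 then w2 else 0
      if w1' ≥ w2' then w1' else w2')
  wells.foldl (fun sum number =>
    ((PySem.List.pyRange 0 (number + 1) 1).foldl
      (fun (cs : Int × Int) i => (cs.1 + i, cs.2 + (cs.1 + i))) (0, sum)).2) 0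

-- ===== PORT B =====
def get_wells_alt (peaks : List Int) : Int :=
  let n : Int := peaks.length
  (PySem.List.pyRange 0 n 1).foldl (fun total i =>
    let l := if i > 0 then PySem.List.pyGetD peaks (i - 1) 0 - PySem.List.pyGetD peaks i 0 else 0
    let r := if i < n - 1 then PySem.List.pyGetD peaks (i + 1) 0 - PySem.List.pyGetD peaks i 0 else 0
    let w := max (max l r) 0
    total + PySem.Int.floordiv (w * (w + 1) * (w + 2)) 6) 0

-- ===== PRECONDITION & SPEC =====
-- Pre_ excludes single-element lists, on which A raises IndexError (it reads peaks[1]).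
def Pre_get_wells (peaks : List Int) : Prop := peaks.length ≠ 1
instance (peaks : List Int) : Decidable (Pre_get_wells peaks) := by unfold Pre_get_wells; infer_instance
def pvWitness_get_wells : List Int := [3, 1, 2]

def Spec_get_wells (peaks : List Int) (out : Int) : Prop := out = get_wells_alt peaks
instance (peaks : List Int) (out : Int) : Decidable (Spec_get_wells peaks out) := by unfold Spec_get_wells; infer_instance

-- ===== CLAIM (what is proved, stated in full; the proofs are below) =====
def Claim_equal_get_wells : Prop := ∀ (peaks : List Int), Dom_get_wells peaks → Pre_get_wells peaks → Spec_get_wells peaks (get_wells peaks)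

-- ===== LEMMAS AND PROOFS =====

-- partial sums of A's inner loop: after m iterations count = pvTri m, sum gained pvTet m
def pvTri : Nat → Int
  | 0 => 0
  | m + 1 => pvTri m + m

def pvTet : Nat → Int
  | 0 => 0
  | m + 1 => pvTet m + pvTri m + m

lemma pvTri_closed (m : Nat) : 2 * pvTri m = ((m : Int) - 1) * m := by
  induction m with
  | zero => simp [pvTri]
  | succ k ih => simp only [pvTri]; push_cast; linear_combination ih

lemma pvTet_closed (m : Nat) : 6 * pvTet m = ((m : Int) - 1) * m * (m + 1) := by
  induction m with
  | zero => simp [pvTet]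
  | succ k ih =>
    have h := pvTri_closed k
    simp only [pvTet]; push_cast; linear_combination ih + 3 * h

lemma pvInner_fold (m : Nat) (s : Int) :
    (PySem.List.pyRange 0 (m : Int) 1).foldl
      (fun (cs : Int × Int) i => (cs.1 + i, cs.2 + (cs.1 + i))) (0, s)
      = (pvTri m, s + pvTet m) := by
  induction m with
  | zero =>
    rw [show ((0 : Nat) : Int) = 0 by norm_num, PySem.List.pyRange_one_eq_nil le_rfl]
    simp [pvTri, pvTet]
  | succ k ih =>
    have hsplit : PySem.List.pyRange 0 ((k + 1 : Nat) : Int) 1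
        = PySem.List.pyRange 0 (k : Int) 1 ++ [(k : Int)] := by
      push_cast
      exact PySem.List.pyRange_one_succ_right (by positivity)
    rw [hsplit, List.foldl_append, ih]
    simp [pvTri, pvTet]; ring

-- one outer iteration of A's summation loop, for a nonnegative well depth w
lemma pvStep (w s : Int) (hw : 0 ≤ w) :
    ((PySem.List.pyRange 0 (w + 1) 1).foldl
      (fun (cs : Int × Int) i => (cs.1 + i, cs.2 + (cs.1 + i))) (0, s)).2
      = s + PySem.Int.floordiv (w * (w + 1) * (w + 2)) 6 := by
  rw [show PySem.List.pyRange 0 (w + 1) 1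
      = PySem.List.pyRange 0 ((w.toNat + 1 : Nat) : Int) 1 by congr 1; omega]
  rw [pvInner_fold]
  have h6 : w * (w + 1) * (w + 2) = 6 * pvTet (w.toNat + 1) := by
    have h := pvTet_closed (w.toNat + 1)
    push_cast at h
    have hwt : ((w.toNat : Int)) = w := by omega
    rw [hwt] at h
    linear_combination -h
  rw [h6, PySem.Int.floordiv_eq_ediv_of_pos (by norm_num),
    Int.mul_ediv_cancel_left _ (by norm_num)]

-- A's clipped-difference branches equal B's max forms
lemma pvMaxR (d : Int) : (if d > 0 then d else 0) = max (max 0 d) 0 := by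
  simp only [max_def]; split_ifs <;> omega

lemma pvMaxL (d : Int) : (if d > 0 then d else 0) = max (max d 0) 0 := by
  simp only [max_def]; split_ifs <;> omega

lemma pvMaxM (d1 d2 : Int) :
    (if (if d1 > 0 then d1 else 0) ≥ (if d2 > 0 then d2 else 0)
     then (if d1 > 0 then d1 else 0) else (if d2 > 0 then d2 else 0))
      = max (max d1 d2) 0 := by
  simp only [max_def]; split_ifs <;> omega

theorem get_wells_spec : Claim_equal_get_wells := by
  intro peaks _ hpre
  unfold Spec_get_wells get_wells get_wells_alt
  simp only [List.foldl_map]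
  apply PySem.List.foldl_congr_mem
  intro s i hi
  rw [PySem.List.mem_pyRange_one] at hi
  obtain ⟨hi0, hin⟩ := hi
  have hlen2 : 2 ≤ peaks.length := by
    unfold Pre_get_wells at hpre; omega
  by_cases h0 : i = 0
  · subst h0
    rw [if_pos rfl, if_neg (lt_irrefl (0 : Int)),
      if_pos (show (0 : Int) < (peaks.length : Int) - 1 by omega)]
    rw [pvMaxR, pvStep _ _ (le_max_right _ _)]
    norm_num
  · by_cases hlast : i = (peaks.length : Int) - 1
    · subst hlast
      rw [if_neg h0, if_pos rfl, if_neg (lt_irrefl ((peaks.length : Int) - 1)),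
        if_pos (show (0 : Int) < (peaks.length : Int) - 1 by omega)]
      have hm2 : PySem.List.pyGetD peaks (-2) 0
          = PySem.List.pyGetD peaks ((peaks.length : Int) - 1 - 1) 0 := by
        rw [PySem.List.pyGetD_neg_ofNat peaks 2 0 (by omega) (by omega)]
        rw [show (peaks.length : Int) - 1 - 1 = ((peaks.length - 2 : Nat) : Int) by omega]
        rw [PySem.List.pyGetD_natCast, List.getD_eq_getElem _ _ (by omega)]
      have hm1 : PySem.List.pyGetD peaks (-1) 0
          = PySem.List.pyGetD peaks ((peaks.length : Int) - 1) 0 := by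
        rw [PySem.List.pyGetD_neg_ofNat peaks 1 0 (by omega) (by omega)]
        rw [show (peaks.length : Int) - 1 = ((peaks.length - 1 : Nat) : Int) by omega]
        rw [PySem.List.pyGetD_natCast, List.getD_eq_getElem _ _ (by omega)]
      rw [hm2, hm1, pvMaxL, pvStep _ _ (le_max_right _ _)]
    · have hi0' : (0 : Int) < i := lt_of_le_of_ne hi0 (Ne.symm h0)
      have hir : i < (peaks.length : Int) - 1 := lt_of_le_of_ne (by omega) hlast
      rw [if_neg h0, if_neg hlast, if_pos hi0', if_pos hir]
      rw [pvMaxM, pvStep _ _ (le_max_right _ _)]
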